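-- pv_equiv track=rewrite | github.com/akmukherjee/RevaAI | notebooks/data_processing/harmonize.py | normalize_specs
-- ===== SOURCE A (Python) =====
-- from typing import Any, Dict, List, Optional
--
-- SPEC_KEYS_MAP = {
--     # Display / Panel
--     "Display Technology": "display_technology",
--     "Display Type": "display_technology",
--     "Display": "display_technology",  # Walmart uses just "Display"
--     "LED Panel Type": "panel_type",
--     "Backlight Type": "backlight_type",
--     "High Dynamic Range (HDR)": "hdr",
--     "High Dynamic Range Format": "hdr_formats",
--     "Resolution": "resolution",
--     "Refresh Rate": "refresh_rate",
--     "Aspect Ratio": "aspect_ratio",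
--     "Standing screen display size": "screen_size",
--     "Screen Size": "screen_size",
--     "Screen Size Class": "screen_size_class",
--
--     # Connectivity
--     "Connectivity Technology": "connectivity",
--     "Number of HDMI Inputs (Total)": "hdmi_inputs",
--     "Number of HDMI Inputs": "hdmi_inputs",
--     "HDMI number": "hdmi_inputs",
--     "USB Ports": "usb_ports",
--     "Number Of USB Port(s) (Total)": "usb_ports",
--     "Wireless Connectivity": "wireless",
--     "Wireless technology": "wireless",
--
--     # Audio / Features
--     "Built-In Speakers": "built_in_speakers",
--     "Special Features": "special_features",
--     "Motion Enhancement Technology": "motion_tech",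
--
--     # Physical / Dimensions
--     "Product Dimensions": "product_dimensions",
--     "Item Weight": "item_weight",
--     "Product Width": "width",
--     "Product Height": "height",
--     "Product Depth": "depth",
--     "Product Height Without Stand": "height_without_stand",
--     "Product Depth Without Stand": "depth_without_stand",
--     "Product Weight Without Stand": "weight_without_stand",
--
--     # Mounting
--     "VESA Wall Mount Standard": "vesa",
--     "Vesa mounting pattern": "vesa",
--
--     # Platform / OS
--     "Smart Platform": "smart_platform",
--     "Platform": "smart_platform",
--
--     # Identity
--     "Brand Name": "brand",
--     "Brand": "brand",
--     "Model Number": "model_number",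
--     "Item model number": "model_number",
--     "ASIN": "asin",
--     "UPC": "upc",
-- }
--
-- def normalize_specs(specs_flat: Dict[str, Any]) -> Dict[str, Any]:
--     """Map source-specific spec keys to standardized column names.
--
--     Uses SPEC_KEYS_MAP to convert retailer-specific field names into
--     a unified schema (e.g., "Display Type" -> "display_technology").
--     Performs case-insensitive matching to handle variations like
--     "Screen Size" vs "Screen size" across retailers.
--     """
--     norm = {}
--     for src_k, norm_k in SPEC_KEYS_MAP.items():
--         # Find case-insensitive match in source data
--         matched_key = None
--         for k in specs_flat.keys():
--             if k.lower() == src_k.lower():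
--                 matched_key = k
--                 break
--
--         if matched_key and specs_flat[matched_key] not in (None, ""):
--             norm[norm_k] = specs_flat[matched_key]
--     return norm
-- ===== SOURCE B (Python) =====
-- from typing import Any, Dict
--
-- # Inverse of SPEC_KEYS_MAP: standardized name -> its source aliases, lowercased,
-- # in the original map order (groups listed in order of first appearance).
-- GROUPED_ALIASES = {
--     'display_technology': ['display technology', 'display type', 'display'],
--     'panel_type': ['led panel type'],
--     'backlight_type': ['backlight type'],
--     'hdr': ['high dynamic range (hdr)'],
--     'hdr_formats': ['high dynamic range format'],
--     'resolution': ['resolution'],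
--     'refresh_rate': ['refresh rate'],
--     'aspect_ratio': ['aspect ratio'],
--     'screen_size': ['standing screen display size', 'screen size'],
--     'screen_size_class': ['screen size class'],
--     'connectivity': ['connectivity technology'],
--     'hdmi_inputs': ['number of hdmi inputs (total)', 'number of hdmi inputs', 'hdmi number'],
--     'usb_ports': ['usb ports', 'number of usb port(s) (total)'],
--     'wireless': ['wireless connectivity', 'wireless technology'],
--     'built_in_speakers': ['built-in speakers'],
--     'special_features': ['special features'],
--     'motion_tech': ['motion enhancement technology'],
--     'product_dimensions': ['product dimensions'],
--     'item_weight': ['item weight'],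
--     'width': ['product width'],
--     'height': ['product height'],
--     'depth': ['product depth'],
--     'height_without_stand': ['product height without stand'],
--     'depth_without_stand': ['product depth without stand'],
--     'weight_without_stand': ['product weight without stand'],
--     'vesa': ['vesa wall mount standard', 'vesa mounting pattern'],
--     'smart_platform': ['smart platform', 'platform'],
--     'brand': ['brand name', 'brand'],
--     'model_number': ['model number', 'item model number'],
--     'asin': ['asin'],
--     'upc': ['upc'],
-- }
--
--
-- def normalize_specs(specs_flat: Dict[str, Any]) -> Dict[str, Any]:
--     """Map source-specific spec keys to standardized column names.
--
--     Target-first formulation: a case-insensitive first-occurrence index of the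
--     source data is built once; each standardized name is then resolved by
--     walking its aliases in map order (a later non-empty alias match wins,
--     exactly as in the original alias-major scan).
--     """
--     index: Dict[str, Any] = {}
--     for k, v in specs_flat.items():
--         lk = k.lower()
--         if lk not in index:
--             index[lk] = v
--
--     norm = {}
--     for norm_k, aliases in GROUPED_ALIASES.items():
--         best = None
--         for a in aliases:
--             v = index.get(a)
--             if v not in (None, ""):
--                 best = v
--         if best is not None:
--             norm[norm_k] = best
--     return norm
-- ===== Notes on version B (the rewrite author's own statement) =====
-- stated objective: alternative
-- what changed: A scans every source key once per SPEC_KEYS_MAP entry (alias-major, one pass over the data per map entry); B resolves target-first: it uses a precomputed inverse table (standard name -> ordered lowercased aliases) and builds a case-insensitive first-occurrence index of the source data in one pass, then looks each alias up in that index (later non-empty matches win, as in A).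
import Mathlib
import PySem

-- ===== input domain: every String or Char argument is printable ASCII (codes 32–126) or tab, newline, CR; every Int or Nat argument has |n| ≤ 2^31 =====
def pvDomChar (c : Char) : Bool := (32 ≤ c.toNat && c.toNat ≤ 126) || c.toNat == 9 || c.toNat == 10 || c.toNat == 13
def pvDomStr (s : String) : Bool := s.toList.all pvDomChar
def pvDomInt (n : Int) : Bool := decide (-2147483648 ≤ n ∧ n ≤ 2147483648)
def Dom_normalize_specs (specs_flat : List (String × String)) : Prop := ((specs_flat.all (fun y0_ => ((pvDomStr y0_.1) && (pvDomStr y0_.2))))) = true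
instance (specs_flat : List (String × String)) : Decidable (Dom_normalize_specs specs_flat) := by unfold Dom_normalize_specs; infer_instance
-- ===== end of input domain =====

-- B replaces A's alias-major rescan of all source keys by a target-first resolution over a
-- precomputed inverse alias table plus a one-pass case-insensitive index of the input
-- (objective: alternative decomposition; same return value).

-- ===== PORT A =====
-- the module constant SPEC_KEYS_MAP (a Python dict literal: insertion order, unique keys)
def SPEC_KEYS_MAP : List (String × String) := [
  ("Display Technology", "display_technology"),
  ("Display Type", "display_technology"),
  ("Display", "display_technology"),
  ("LED Panel Type", "panel_type"),
  ("Backlight Type", "backlight_type"),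
  ("High Dynamic Range (HDR)", "hdr"),
  ("High Dynamic Range Format", "hdr_formats"),
  ("Resolution", "resolution"),
  ("Refresh Rate", "refresh_rate"),
  ("Aspect Ratio", "aspect_ratio"),
  ("Standing screen display size", "screen_size"),
  ("Screen Size", "screen_size"),
  ("Screen Size Class", "screen_size_class"),
  ("Connectivity Technology", "connectivity"),
  ("Number of HDMI Inputs (Total)", "hdmi_inputs"),
  ("Number of HDMI Inputs", "hdmi_inputs"),
  ("HDMI number", "hdmi_inputs"),
  ("USB Ports", "usb_ports"),
  ("Number Of USB Port(s) (Total)", "usb_ports"),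
  ("Wireless Connectivity", "wireless"),
  ("Wireless technology", "wireless"),
  ("Built-In Speakers", "built_in_speakers"),
  ("Special Features", "special_features"),
  ("Motion Enhancement Technology", "motion_tech"),
  ("Product Dimensions", "product_dimensions"),
  ("Item Weight", "item_weight"),
  ("Product Width", "width"),
  ("Product Height", "height"),
  ("Product Depth", "depth"),
  ("Product Height Without Stand", "height_without_stand"),
  ("Product Depth Without Stand", "depth_without_stand"),
  ("Product Weight Without Stand", "weight_without_stand"),
  ("VESA Wall Mount Standard", "vesa"),
  ("Vesa mounting pattern", "vesa"),
  ("Smart Platform", "smart_platform"),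
  ("Platform", "smart_platform"),
  ("Brand Name", "brand"),
  ("Brand", "brand"),
  ("Model Number", "model_number"),
  ("Item model number", "model_number"),
  ("ASIN", "asin"),
  ("UPC", "upc")]

-- A's inner loop: first k in specs_flat.keys() with k.lower() == src_k.lower() (src_k.lower() passed in)
def pvFindMatch (keys : List String) (l : String) : Option String :=
  match keys with
  | [] => none
  | k :: rest => if PySem.Str.lower k = l then some k else pvFindMatch rest l

-- the dict parameter arrives as an association list; Python receives it as a dict
def normalize_specs (specs_flat : List (String × String)) : List (String × String) :=
  let d := PySem.Dict.ofList specs_flat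
  let norm := SPEC_KEYS_MAP.foldl (fun norm p =>
    match pvFindMatch d.keys (PySem.Str.lower p.1) with
    | some matched_key =>
        -- 'if matched_key' : Python truthiness of the matched key
        if matched_key ≠ "" then
          match d.get? matched_key with  -- specs_flat[matched_key]; the key is present, none unreachable
          | some v => if v ≠ "" then norm.insert p.2 v else norm  -- 'not in (None, "")' on a str value
          | none => norm
        else norm
    | none => norm) PySem.Dict.empty
  norm.items

-- ===== PORT B =====
-- Source B's module constant: standardized name -> lowercased source aliases, in map order
def GROUPED_ALIASES : List (String × List String) := [
  ("display_technology", ["display technology", "display type", "display"]),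
  ("panel_type", ["led panel type"]),
  ("backlight_type", ["backlight type"]),
  ("hdr", ["high dynamic range (hdr)"]),
  ("hdr_formats", ["high dynamic range format"]),
  ("resolution", ["resolution"]),
  ("refresh_rate", ["refresh rate"]),
  ("aspect_ratio", ["aspect ratio"]),
  ("screen_size", ["standing screen display size", "screen size"]),
  ("screen_size_class", ["screen size class"]),
  ("connectivity", ["connectivity technology"]),
  ("hdmi_inputs", ["number of hdmi inputs (total)", "number of hdmi inputs", "hdmi number"]),
  ("usb_ports", ["usb ports", "number of usb port(s) (total)"]),
  ("wireless", ["wireless connectivity", "wireless technology"]),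
  ("built_in_speakers", ["built-in speakers"]),
  ("special_features", ["special features"]),
  ("motion_tech", ["motion enhancement technology"]),
  ("product_dimensions", ["product dimensions"]),
  ("item_weight", ["item weight"]),
  ("width", ["product width"]),
  ("height", ["product height"]),
  ("depth", ["product depth"]),
  ("height_without_stand", ["product height without stand"]),
  ("depth_without_stand", ["product depth without stand"]),
  ("weight_without_stand", ["product weight without stand"]),
  ("vesa", ["vesa wall mount standard", "vesa mounting pattern"]),
  ("smart_platform", ["smart platform", "platform"]),
  ("brand", ["brand name", "brand"]),
  ("model_number", ["model number", "item model number"]),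
  ("asin", ["asin"]),
  ("upc", ["upc"])]

-- Source B's first loop: case-insensitive first-occurrence index of the source items
def pvBuildIndex : List (String × String) → PySem.Dict String String → PySem.Dict String String
  | [], ix => ix
  | kv :: rest, ix =>
      pvBuildIndex rest
        (if ix.contains (PySem.Str.lower kv.1) then ix
         else ix.insert (PySem.Str.lower kv.1) kv.2)

-- Source B's inner loop: walk the aliases, a later non-empty match overwrites 'best'
def pvResolve (ix : PySem.Dict String String) : List String → Option String → Option String
  | [], best => best
  | a :: rest, best =>
      pvResolve ix rest
        (match ix.get? a with      -- index.get(a); 'v not in (None, "")'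
         | some v => if v ≠ "" then some v else best
         | none => best)

-- Source B's outer loop: emit norm_k only when some alias resolved
def pvEmit (ix : PySem.Dict String String) :
    List (String × List String) → PySem.Dict String String → PySem.Dict String String
  | [], norm => norm
  | q :: rest, norm =>
      pvEmit ix rest
        (match pvResolve ix q.2 none with
         | some v => norm.insert q.1 v
         | none => norm)

def normalize_specs_alt (specs_flat : List (String × String)) : List (String × String) :=
  let d := PySem.Dict.ofList specs_flat
  let index := pvBuildIndex d.items PySem.Dict.empty
  (pvEmit index GROUPED_ALIASES PySem.Dict.empty).items

-- ===== PRECONDITION & SPEC =====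
def Spec_normalize_specs (specs_flat : List (String × String)) (out : List (String × String)) : Prop := out = normalize_specs_alt specs_flat
instance (specs_flat : List (String × String)) (out : List (String × String)) : Decidable (Spec_normalize_specs specs_flat out) := by unfold Spec_normalize_specs; infer_instance

-- ===== CLAIM (what is proved, stated in full; the proofs are below) =====
def Claim_equal_normalize_specs : Prop := ∀ (specs_flat : List (String × String)), Dom_normalize_specs specs_flat → Spec_normalize_specs specs_flat (normalize_specs specs_flat)

-- ===== LEMMAS AND PROOFS =====

-- first value in the association list whose key lowercases to l
def pvFirstHit : List (String × String) → String → Option String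
  | [], _ => none
  | (k, v) :: rest, l => if PySem.Str.lower k = l then some v else pvFirstHit rest l

-- drop empty-string values ('not in (None, "")')
def pvGood (o : Option String) : Option String :=
  match o with
  | some v => if v ≠ "" then some v else none
  | none => none

-- the non-empty first case-insensitive hit: the one decision both programs make per alias
def pvGfun (items : List (String × String)) (l : String) : Option String :=
  pvGood (pvFirstHit items l)

-- A's per-map-entry effect on norm, abstracted over the hit function g
def pvStep (g : String → Option String) (n : PySem.Dict String String)
    (p : String × String) : PySem.Dict String String :=
  match g p.1 with
  | some v => n.insert p.2 v
  | none => n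

-- B's last-good-hit scan over an alias list, abstracted over the hit function g
def pvLast (g : String → Option String) (b : Option String) (as : List String) : Option String :=
  as.foldl (fun b a => match g a with | some v => some v | none => b) b

def pvApply (n : PySem.Dict String String) (nk : String) (b : Option String) :
    PySem.Dict String String :=
  match b with
  | some v => n.insert nk v
  | none => n

def pvFlatten (gs : List (String × List String)) : List (String × String) :=
  gs.flatMap (fun q => q.2.map (fun a => (a, q.1)))

theorem pvFindMatch_some (keys : List String) (l mk : String)
    (h : pvFindMatch keys l = some mk) : mk ∈ keys ∧ PySem.Str.lower mk = l := by
  induction keys with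
  | nil => simp [pvFindMatch] at h
  | cons k rest ih =>
    simp only [pvFindMatch] at h
    split at h
    · cases h
      exact ⟨List.mem_cons_self, by assumption⟩
    · obtain ⟨h1, h2⟩ := ih h
      exact ⟨List.mem_cons_of_mem _ h1, h2⟩

-- A's find-then-index equals the first case-insensitive hit (needs distinct keys)
theorem pvAssoc (ds : List (String × String)) (l : String)
    (hnd : (ds.map Prod.fst).Nodup) :
    (match pvFindMatch (ds.map Prod.fst) l with
     | some mk => (PySem.Dict.mk ds).get? mk
     | none => none) = pvFirstHit ds l := by
  induction ds with
  | nil => simp [pvFindMatch, pvFirstHit]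
  | cons kv rest ih =>
    obtain ⟨k, v⟩ := kv
    simp only [List.map_cons, List.nodup_cons] at hnd
    simp only [List.map_cons, pvFindMatch, pvFirstHit]
    by_cases hl : PySem.Str.lower k = l
    · simp [hl, PySem.Dict.get?_mk_cons]
    · simp only [if_neg hl]
      rw [← ih hnd.2]
      cases hfm : pvFindMatch (rest.map Prod.fst) l with
      | none => rfl
      | some mk =>
        have hmem := (pvFindMatch_some _ _ _ hfm).1
        have hne : (k == mk) = false := by
          simp only [beq_eq_false_iff_ne]
          intro hkm; exact hnd.1 (hkm ▸ hmem)
        simp [PySem.Dict.get?_mk_cons, hne]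

-- B's first-occurrence index looks up the first case-insensitive hit
theorem pvIndex (items : List (String × String)) (ix : PySem.Dict String String) (l : String) :
    ((pvBuildIndex items ix).get? l)
    = match ix.get? l with
      | some w => some w
      | none => pvFirstHit items l := by
  induction items generalizing ix with
  | nil => cases h : ix.get? l <;> simp [pvBuildIndex, pvFirstHit, h]
  | cons kv rest ih =>
    obtain ⟨k, v⟩ := kv
    simp only [pvBuildIndex, pvFirstHit]
    by_cases hc : ix.contains (PySem.Str.lower k)
    · rw [if_pos hc, ih]
      have hs : (ix.get? (PySem.Str.lower k)).isSome := by
        rw [← PySem.Dict.contains_eq_isSome_get?]; exact hc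
      by_cases he : PySem.Str.lower k = l
      · subst he
        cases hx : ix.get? (PySem.Str.lower k) with
        | none => rw [hx] at hs; simp at hs
        | some w => rfl
      · cases hx : ix.get? l <;> simp [he]
    · rw [if_neg hc, ih, PySem.Dict.get?_insert]
      have hg : ix.get? (PySem.Str.lower k) = none := by
        rw [PySem.Dict.contains_eq_isSome_get?] at hc
        cases hx : ix.get? (PySem.Str.lower k) <;> simp [hx] at hc ⊢
      by_cases he : l = PySem.Str.lower k
      · subst he
        simp [hg]
      · have he' : PySem.Str.lower k ≠ l := fun h => he h.symm
        cases hx : ix.get? l <;> simp [he, he']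

-- pvResolve is the abstract last-good scan when ix answers like g
theorem pvResolve_eq (ix : PySem.Dict String String) (g : String → Option String)
    (hg : ∀ a, pvGood (ix.get? a) = g a)
    (as : List String) (b : Option String) :
    pvResolve ix as b = pvLast g b as := by
  induction as generalizing b with
  | nil => rfl
  | cons a rest ih =>
    simp only [pvResolve, pvLast, List.foldl_cons]
    rw [ih]
    have : (match ix.get? a with
            | some v => if v ≠ "" then some v else b
            | none => b)
         = (match g a with | some v => some v | none => b) := by
      rw [← hg a]
      cases hx : ix.get? a with
      | none => rfl
      | some v => by_cases hv : v = "" <;> simp [pvGood, hv]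
    rw [this]
    rfl

-- pvEmit is the group-by-group fold pvG talks about
theorem pvEmit_eq (ix : PySem.Dict String String) (g : String → Option String)
    (hg : ∀ a, pvGood (ix.get? a) = g a)
    (gs : List (String × List String)) (n : PySem.Dict String String) :
    pvEmit ix gs n = gs.foldl (fun n q => pvApply n q.1 (pvLast g none q.2)) n := by
  induction gs generalizing n with
  | nil => rfl
  | cons q rest ih =>
    simp only [pvEmit, List.foldl_cons]
    rw [pvResolve_eq ix g hg]
    rw [ih]
    rfl

theorem pvPgen (g : String → Option String) (as : List String) (nk : String)
    (b : Option String) (n : PySem.Dict String String) :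
    as.foldl (fun n a => pvStep g n (a, nk)) (pvApply n nk b)
    = pvApply n nk (pvLast g b as) := by
  induction as generalizing b with
  | nil => rfl
  | cons a rest ih =>
    simp only [List.foldl_cons]
    have h1 : pvStep g (pvApply n nk b) (a, nk)
        = pvApply n nk (match g a with | some v => some v | none => b) := by
      cases hg : g a with
      | none => simp [pvStep, hg]
      | some v => cases b <;> simp [pvStep, pvApply, hg, PySem.Dict.insert_insert_self]
    rw [h1]
    exact ih _

-- alias-by-alias fold over the flattened grouping = group-by-group fold
theorem pvG (g : String → Option String) (gs : List (String × List String))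
    (n : PySem.Dict String String) :
    (pvFlatten gs).foldl (pvStep g) n
    = gs.foldl (fun n q => pvApply n q.1 (pvLast g none q.2)) n := by
  induction gs generalizing n with
  | nil => rfl
  | cons q rest ih =>
    rw [show pvFlatten (q :: rest) = q.2.map (fun a => (a, q.1)) ++ pvFlatten rest by
      simp [pvFlatten]]
    rw [List.foldl_append, List.foldl_map, List.foldl_cons]
    have hb := pvPgen g q.2 q.1 none n
    rw [show pvApply n q.1 none = n from rfl] at hb
    rw [hb]
    exact ih _

-- no source alias in the map lowercases to the empty string
set_option maxRecDepth 40000 in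
theorem pvMapNonempty : ∀ p ∈ SPEC_KEYS_MAP, PySem.Str.lower p.1 ≠ "" := by decide

-- Source B's literal GROUPED_ALIASES flattens back to the lowered SPEC_KEYS_MAP (closed terms)
set_option maxRecDepth 40000 in
theorem pvGroupsFlatten :
    pvFlatten GROUPED_ALIASES
    = SPEC_KEYS_MAP.map (fun p => (PySem.Str.lower p.1, p.2)) := by decide

-- A's per-entry body, rewritten through pvAssoc
theorem pvAstep (d : PySem.Dict String String) (hnd : (d.items.map Prod.fst).Nodup)
    (acc : PySem.Dict String String) (p : String × String)
    (hne : PySem.Str.lower p.1 ≠ "") :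
    (match pvFindMatch d.keys (PySem.Str.lower p.1) with
     | some matched_key =>
         if matched_key ≠ "" then
           match d.get? matched_key with
           | some v => if v ≠ "" then acc.insert p.2 v else acc
           | none => acc
         else acc
     | none => acc)
    = pvStep (pvGfun d.items) acc (PySem.Str.lower p.1, p.2) := by
  have hassoc := pvAssoc d.items (PySem.Str.lower p.1) hnd
  have hkeys : d.keys = d.items.map Prod.fst := rfl
  rw [hkeys]
  cases hfm : pvFindMatch (d.items.map Prod.fst) (PySem.Str.lower p.1) with
  | none =>
    simp only [hfm] at hassoc
    simp only [pvStep, pvGfun, ← hassoc, pvGood]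
  | some mk =>
    simp only [hfm] at hassoc
    have hdq : d.get? mk = pvFirstHit d.items (PySem.Str.lower p.1) := hassoc
    have hmk : mk ≠ "" := by
      intro h
      apply hne
      rw [← (pvFindMatch_some _ _ _ hfm).2, h]
      rfl
    simp only [if_pos hmk]
    rw [hdq]
    simp only [pvStep, pvGfun, pvGood]
    cases pvFirstHit d.items (PySem.Str.lower p.1) with
    | none => rfl
    | some v => by_cases hv : v = "" <;> simp [hv]

set_option maxRecDepth 40000 in
theorem normalize_specs_eq (specs_flat : List (String × String)) :
    normalize_specs specs_flat = normalize_specs_alt specs_flat := by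
  unfold normalize_specs normalize_specs_alt
  simp only []
  congr 1
  set d := PySem.Dict.ofList specs_flat with hd
  have hnd : (d.items.map Prod.fst).Nodup := by
    have := PySem.Dict.nodup_keys_ofList specs_flat
    simpa [PySem.Dict.keys, hd] using this
  have hg : ∀ a, pvGood ((pvBuildIndex d.items PySem.Dict.empty).get? a) = pvGfun d.items a := by
    intro a
    rw [pvIndex]
    simp only [PySem.Dict.get?_empty]
    rfl
  rw [pvEmit_eq _ (pvGfun d.items) hg, ← pvG, pvGroupsFlatten]
  trans (SPEC_KEYS_MAP.foldl
    (fun n p => pvStep (pvGfun d.items) n (PySem.Str.lower p.1, p.2)) PySem.Dict.empty)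
  · apply PySem.List.foldl_congr_mem
    intro acc p hp
    exact pvAstep d hnd acc p (pvMapNonempty p hp)
  · exact (List.foldl_map).symm

-- ===== VERDICT (by name: the statement is the Claim_ definition above) =====
theorem normalize_specs_spec : Claim_equal_normalize_specs := by
  intro specs_flat _
  unfold Spec_normalize_specs
  exact normalize_specs_eq specs_flat
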